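-- pv_equiv track=rewrite | github.com/nev3rfail/telegram-nanobot | plugins/text_vertical.py | do_vertical
-- ===== SOURCE A (Python) =====
-- def do_vertical(msg):
--     s = msg
--     sb = ""
--     for i in range(len(s)):
--         sb += s[i] + " "
--     spaces = " "
--     sb += '\n'
--     for i in range(1, len(s)):
--         sb += s[i] + spaces + s[i] + '\n'
--         spaces += "  "
--     return sb
-- ===== SOURCE B (Python) =====
-- def do_vertical(msg):
--     n = len(msg)
--
--     def cell(i, j):
--         if i == 0:
--             return msg[j // 2] if j % 2 == 0 else ' '
--         return msg[i] if j == 0 or j == 2 * i else ' '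
--
--     widths = [2 * n] + [2 * i + 1 for i in range(1, n)]
--     return ''.join(''.join(cell(i, j) for j in range(w)) + '\n'
--                    for i, w in enumerate(widths))
-- ===== Notes on version B (the rewrite author's own statement) =====
-- stated objective: alternative
-- what changed: Treats the output as a 2D grid rendered cell by cell: a cell function maps coordinates (i,j) to a character and each line is produced by sweeping its column range, replacing A's sequential string accumulation with its growing spaces state.
import Mathlib
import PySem

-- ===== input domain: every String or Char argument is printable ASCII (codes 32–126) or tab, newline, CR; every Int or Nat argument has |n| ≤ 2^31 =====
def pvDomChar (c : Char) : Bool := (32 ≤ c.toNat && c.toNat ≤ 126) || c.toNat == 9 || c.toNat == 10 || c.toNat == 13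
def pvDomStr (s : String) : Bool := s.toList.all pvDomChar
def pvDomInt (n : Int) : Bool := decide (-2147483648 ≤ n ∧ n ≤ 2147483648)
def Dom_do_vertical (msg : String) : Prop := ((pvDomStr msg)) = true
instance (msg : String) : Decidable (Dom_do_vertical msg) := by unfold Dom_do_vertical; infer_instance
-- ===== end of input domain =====

-- B renders the layout as a 2D grid via a coordinate→character cell function swept over each line's column range, instead of A's sequential accumulation with a growing spaces string (objective: alternative).


-- ===== PORT A =====
-- A's body on the character list: two index-range accumulation loops (sb and the growing spaces accumulator)
def pyVerticalA (cs : List Char) : List Char :=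
  let sb : List Char := (PySem.List.pyRange 0 (PySem.List.len cs) 1).foldl
      (fun sb i => sb ++ [PySem.List.pyGetD cs i ' ', ' ']) []
  let sb2 := sb ++ ['\n']
  let res := (PySem.List.pyRange 1 (PySem.List.len cs) 1).foldl
      (fun (st : List Char × List Char) i =>
        (st.1 ++ [PySem.List.pyGetD cs i ' '] ++ st.2 ++ [PySem.List.pyGetD cs i ' '] ++ ['\n'],
         st.2 ++ [' ', ' '])) (sb2, [' '])
  res.1

def do_vertical (msg : String) : String :=
  String.ofList (pyVerticalA msg.toList)

-- ===== PORT B =====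
-- B's cell function: the character of the grid at line i, column j
def pyCellB (cs : List Char) (i j : Int) : Char :=
  if i = 0 then
    (if PySem.Int.mod j 2 = 0 then PySem.List.pyGetD cs (PySem.Int.floordiv j 2) ' ' else ' ')
  else if j = 0 ∨ j = 2 * i then PySem.List.pyGetD cs i ' ' else ' '

-- B's body: each line is the cell function swept over its column range, a '\n' after each line
def pyVerticalB (cs : List Char) : List Char :=
  let n := PySem.List.len cs
  let widths : List Int := (2 * n) :: (PySem.List.pyRange 1 n 1).map (fun i => 2 * i + 1)
  (PySem.List.enumerate widths).flatMap (fun p =>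
    (PySem.List.pyRange 0 p.2 1).map (pyCellB cs p.1) ++ ['\n'])

def do_vertical_alt (msg : String) : String :=
  String.ofList (pyVerticalB msg.toList)

-- ===== PRECONDITION & SPEC =====
def Spec_do_vertical (msg : String) (out : String) : Prop := out = do_vertical_alt msg
instance (msg : String) (out : String) : Decidable (Spec_do_vertical msg out) := by unfold Spec_do_vertical; infer_instance

-- ===== CLAIM (what is proved, stated in full; the proofs are below) =====
def Claim_equal_do_vertical : Prop := ∀ (msg : String), Dom_do_vertical msg → Spec_do_vertical msg (do_vertical msg)

-- ===== LEMMAS AND PROOFS =====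

-- A's second loop in closed form: the spaces accumulator at index i holds 2*i-1 spaces
theorem pv_loopA_spec (cs : List Char) (k : Nat) : ∀ (a : Int), 1 ≤ a → ∀ (sb : List Char),
    (((PySem.List.pyRange a (a + (k : Int)) 1).foldl
      (fun (st : List Char × List Char) i =>
        (st.1 ++ [PySem.List.pyGetD cs i ' '] ++ st.2 ++ [PySem.List.pyGetD cs i ' '] ++ ['\n'],
         st.2 ++ [' ', ' '])) (sb, List.replicate (2*a-1).toNat ' ')).1)
    = sb ++ (PySem.List.pyRange a (a + (k : Int)) 1).flatMap
        (fun i => [PySem.List.pyGetD cs i ' '] ++ List.replicate (2*i-1).toNat ' '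
                  ++ [PySem.List.pyGetD cs i ' '] ++ ['\n']) := by
  induction k with
  | zero =>
    intro a ha sb
    rw [show a + ((0 : Nat) : Int) = a by omega, PySem.List.pyRange_one_eq_nil (le_refl a)]
    simp only [List.foldl_nil, List.flatMap_nil, List.append_nil]
  | succ k ih =>
    intro a ha sb
    rw [show a + ((k + 1 : Nat) : Int) = (a + 1) + (k : Int) by push_cast; ring]
    rw [PySem.List.pyRange_one_cons (by omega : a < (a + 1) + (k : Int))]
    simp only [List.foldl_cons, List.flatMap_cons]
    have hrep : List.replicate (2*a-1).toNat ' ' ++ [' ', ' ']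
        = List.replicate (2*(a+1)-1).toNat ' ' := by
      rw [show (2*(a+1)-1).toNat = (2*a-1).toNat + 2 by omega, List.replicate_add]
      rfl
    rw [hrep, ih (a + 1) (by omega)]
    simp only [List.append_assoc]

-- enumerating a map over a consecutive range, starting the count where the range starts, pairs each i with f i
theorem pv_enum_range (f : Int → Int) (k : Nat) : ∀ (a : Int),
    PySem.List.enumerate ((PySem.List.pyRange a (a + (k : Int)) 1).map f) a
      = (PySem.List.pyRange a (a + (k : Int)) 1).map (fun i => (i, f i)) := by
  induction k with
  | zero =>
    intro a
    rw [show a + ((0 : Nat) : Int) = a by omega, PySem.List.pyRange_one_eq_nil (le_refl a)]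
    rfl
  | succ k ih =>
    intro a
    rw [show a + ((k + 1 : Nat) : Int) = (a + 1) + (k : Int) by push_cast; ring]
    rw [PySem.List.pyRange_one_cons (by omega : a < (a + 1) + (k : Int))]
    rw [List.map_cons, PySem.List.enumerate_cons, ih (a + 1), List.map_cons]

-- B's line 0 on the Nat side: index-parity rendering equals the char-space concatenation
theorem pv_row0_nat (cs : List Char) :
    (List.range (2 * cs.length)).map
        (fun k => if k % 2 = 0 then cs.getD (k / 2) ' ' else ' ')
      = cs.flatMap (fun c => [c, ' ']) := by
  induction cs with
  | nil => rfl
  | cons c t ih =>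
    rw [show 2 * (c :: t).length = 2 + 2 * t.length by simp; ring, List.range_add]
    rw [List.map_append, List.map_map]
    have hshift : ((fun k => if k % 2 = 0 then (c :: t).getD (k / 2) ' ' else ' ')
          ∘ (fun k => 2 + k))
        = (fun k => if k % 2 = 0 then t.getD (k / 2) ' ' else ' ') := by
      funext k
      simp only [Function.comp_apply]
      rw [Nat.add_mod_left, show (2 + k) / 2 = k / 2 + 1 by omega, List.getD_cons_succ]
    rw [hshift, ih]
    simp [List.range_succ, List.flatMap_cons]

-- B's line 0 on the Int side
theorem pv_row0 (cs : List Char) :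
    (PySem.List.pyRange 0 (2 * PySem.List.len cs) 1).map (pyCellB cs 0)
      = cs.flatMap (fun c => [c, ' ']) := by
  rw [show 2 * PySem.List.len cs = ((2 * cs.length : Nat) : Int) by
        rw [PySem.List.len_eq]; push_cast; ring]
  rw [PySem.List.pyRange_zero_nat, List.map_map, ← pv_row0_nat cs]
  apply List.map_congr_left
  intro k _
  simp only [Function.comp_apply, pyCellB]
  have hm : PySem.Int.mod (k : Int) 2 = ((k % 2 : Nat) : Int) := by
    exact_mod_cast PySem.Int.mod_natCast k 2
  have hd : PySem.Int.floordiv (k : Int) 2 = ((k / 2 : Nat) : Int) := by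
    exact_mod_cast PySem.Int.floordiv_natCast k 2
  rw [hm, hd, PySem.List.pyGetD_natCast]
  have hmc : (((k % 2 : Nat) : Int) = 0) ↔ (k % 2 = 0) := Nat.cast_eq_zero
  by_cases h : k % 2 = 0
  · rw [if_pos (hmc.mpr h), if_pos h, if_pos trivial]
  · rw [if_neg (fun hh => h (hmc.mp hh)), if_neg h, if_pos trivial]

-- B's line i (1 ≤ i): the column sweep equals char, 2*i-1 spaces, char
theorem pv_rowi (cs : List Char) (i : Int) (hi : 1 ≤ i) :
    (PySem.List.pyRange 0 (2 * i + 1) 1).map (pyCellB cs i)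
      = [PySem.List.pyGetD cs i ' '] ++ List.replicate (2*i-1).toNat ' '
        ++ [PySem.List.pyGetD cs i ' '] := by
  rw [PySem.List.pyRange_one_cons (by omega : (0:Int) < 2*i+1)]
  rw [show (0:Int) + 1 = 1 by norm_num]
  rw [PySem.List.pyRange_one_append 1 (2*i) (2*i+1) (by omega) (by omega)]
  rw [PySem.List.pyRange_one_cons (by omega : 2*i < 2*i+1)]
  rw [PySem.List.pyRange_one_eq_nil (le_refl (2*i+1))]
  rw [List.map_cons, List.map_append, List.map_cons, List.map_nil]
  have h0 : pyCellB cs i 0 = PySem.List.pyGetD cs i ' ' := by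
    unfold pyCellB
    rw [if_neg (by omega : ¬ i = 0), if_pos (Or.inl rfl)]
  have h2 : pyCellB cs i (2*i) = PySem.List.pyGetD cs i ' ' := by
    unfold pyCellB
    rw [if_neg (by omega : ¬ i = 0), if_pos (Or.inr rfl)]
  have hmid : (PySem.List.pyRange 1 (2*i) 1).map (pyCellB cs i)
      = List.replicate (2*i-1).toNat ' ' := by
    rw [List.map_congr_left (g := fun _ => ' ') ?_]
    · rw [List.map_const', PySem.List.length_pyRange_one]
    · intro j hj
      have hb := PySem.List.mem_pyRange_one.mp hj
      unfold pyCellB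
      rw [if_neg (by omega : ¬ i = 0), if_neg (by rintro (h | h) <;> omega)]
  rw [h0, h2, hmid]
  simp only [List.cons_append, List.nil_append]

theorem pv_core_eq (cs : List Char) : pyVerticalA cs = pyVerticalB cs := by
  by_cases hc : cs = []
  · subst hc; rfl
  · have hlen1 : 1 ≤ cs.length := List.length_pos_iff.mpr hc
    obtain ⟨k, hk⟩ : ∃ k : Nat, PySem.List.len cs = 1 + (k : Int) :=
      ⟨cs.length - 1, by rw [PySem.List.len_eq]; omega⟩
    unfold pyVerticalA pyVerticalB
    rw [PySem.List.foldl_pyRange_zero_pyGetD cs ' ' (fun acc x => acc ++ [x, ' ']) []]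
    rw [PySem.List.foldl_append_eq_flatMap (fun x : Char => [x, ' '])]
    simp only [PySem.List.enumerate_cons, List.flatMap_cons]
    rw [show (0:Int) + 1 = 1 by norm_num]
    have hloop := pv_loopA_spec cs k 1 (le_refl 1)
    rw [show List.replicate ((2*(1:Int)-1)).toNat ' ' = [' '] from by decide] at hloop
    rw [hk, pv_enum_range (fun i => 2 * i + 1) k 1, hloop]
    rw [show (2*(1+(k:Int))) = 2 * PySem.List.len cs by rw [hk], pv_row0]
    have hbody : (List.map (fun i => (i, 2 * i + 1)) (PySem.List.pyRange 1 (1+(k:Int)) 1)).flatMap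
          (fun p : Int × Int => (PySem.List.pyRange 0 p.2 1).map (pyCellB cs p.1) ++ ['\n'])
        = (PySem.List.pyRange 1 (1+(k:Int)) 1).flatMap
          (fun i => [PySem.List.pyGetD cs i ' '] ++ List.replicate (2*i-1).toNat ' '
                    ++ [PySem.List.pyGetD cs i ' '] ++ ['\n']) := by
      rw [List.flatMap_def, List.map_map, List.flatMap_def]
      refine congrArg List.flatten (List.map_congr_left ?_)
      intro i hi
      have hb := PySem.List.mem_pyRange_one.mp hi
      simp only [Function.comp_apply]
      rw [pv_rowi cs i hb.1]
    rw [hbody]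
    simp only [List.nil_append]

-- ===== VERDICT (by name: the statement is the Claim_ definition above) =====
theorem do_vertical_spec : Claim_equal_do_vertical := by
  intro msg _
  unfold Spec_do_vertical do_vertical do_vertical_alt
  exact congrArg String.ofList (pv_core_eq msg.toList)
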